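-- pv_equiv track=rewrite | github.com/alawein/alawein | scripts/generate-arch-diagram.py | generate_topology_mermaid
-- ===== SOURCE A (Python) =====
-- MAX_PER_GROUP = 8
--
-- def group_by_type(repos: list[dict]) -> dict[str, list[dict]]:
--     groups: dict[str, list[dict]] = {}
--     for r in repos:
--         rtype = r.get("type", "other")
--         groups.setdefault(rtype, []).append(r)
--     return groups
--
-- def repo_label(r: dict) -> str:
--     slug = r.get("slug") or r.get("name", "?")
--     desc = (r.get("canonical_description") or "")[:35]
--     return f'"{slug}\\n{desc}"' if desc else f'"{slug}"'
--
-- def generate_topology_mermaid(repos: list[dict]) -> str: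
--     groups = group_by_type(repos)
--     lines = ["```mermaid", "graph TB"]
--     for rtype, group in sorted(groups.items()):
--         safe_id = rtype.replace("-", "_").replace(" ", "_")
--         label = rtype.replace("-", " ").title()
--         lines.append(f"  subgraph {safe_id}[\"{label} Repos\"]")
--         for r in group[:MAX_PER_GROUP]:
--             slug = (r.get("slug") or r.get("name", "?")).replace("-", "_")
--             lines.append(f"    {slug}[{repo_label(r)}]")
--         if len(group) > MAX_PER_GROUP:
--             lines.append(f'    more_{safe_id}["… {len(group) - MAX_PER_GROUP} more"]')
--         lines.append("  end")
--     lines.append("```")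
--     return "\n".join(lines)
-- ===== SOURCE B (Python) =====
-- MAX_PER_GROUP = 8
--
-- def generate_topology_mermaid(repos: list[dict]) -> str:
--     def rtype(r):
--         return r.get("type", "other")
--
--     def label_of(r):
--         slug = r.get("slug") or r.get("name", "?")
--         desc = (r.get("canonical_description") or "")[:35]
--         return f'"{slug}\\n{desc}"' if desc else f'"{slug}"'
--
--     def block(t, group):
--         safe_id = t.replace("-", "_").replace(" ", "_")
--         title = t.replace("-", " ").title()
--         body = [
--             f"    {(r.get('slug') or r.get('name', '?')).replace('-', '_')}[{label_of(r)}]"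
--             for r in group[:MAX_PER_GROUP]
--         ]
--         more = (
--             [f'    more_{safe_id}["… {len(group) - MAX_PER_GROUP} more"]']
--             if len(group) > MAX_PER_GROUP
--             else []
--         )
--         return [f'  subgraph {safe_id}["{title} Repos"]'] + body + more + ["  end"]
--
--     types = sorted({rtype(r) for r in repos})
--     blocks = [
--         line
--         for t in types
--         for line in block(t, [r for r in repos if rtype(r) == t])
--     ]
--     return "\n".join(["```mermaid", "graph TB"] + blocks + ["```"])
-- ===== Notes on version B (the rewrite author's own statement) =====
-- stated objective: idiomatic
-- what changed: B drops the dict-based group_by_type entirely: it sorts the distinct type keys (a set) and emits each subgraph from a per-type filter pass over repos, building the lines with comprehensions instead of an accumulator loop.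
import Mathlib
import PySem

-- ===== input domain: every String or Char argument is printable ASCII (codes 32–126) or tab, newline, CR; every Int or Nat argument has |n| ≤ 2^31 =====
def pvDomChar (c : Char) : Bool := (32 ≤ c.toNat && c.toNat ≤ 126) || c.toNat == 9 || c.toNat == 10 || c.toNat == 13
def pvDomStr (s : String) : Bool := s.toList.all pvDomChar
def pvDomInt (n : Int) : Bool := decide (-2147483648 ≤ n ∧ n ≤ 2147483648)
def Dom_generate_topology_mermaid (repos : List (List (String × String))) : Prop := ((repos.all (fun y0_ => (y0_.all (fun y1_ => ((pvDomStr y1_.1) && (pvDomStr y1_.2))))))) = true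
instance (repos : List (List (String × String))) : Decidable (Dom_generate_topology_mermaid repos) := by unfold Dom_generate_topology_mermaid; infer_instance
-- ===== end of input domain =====

-- B replaces A's dict-based group_by_type + sorted(items) with sorted distinct types and a
-- per-type filter pass, building the output with comprehensions (objective: idiomatic; not faster).

-- ===== PORT A =====
-- shared primitive: Python str.title(), exact on ASCII (cased chars = ASCII letters on this domain)
def pyTitleGo (prevAlpha : Bool) : List Char → List Char
  | [] => []
  | c :: cs =>
    (if c.isAlpha then (if prevAlpha then c.toLower else c.toUpper) else c) :: pyTitleGo c.isAlpha cs

def pyTitle (s : String) : String := String.ofList (pyTitleGo false s.toList)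

-- r.get(k, d) on a Python dict (association list, first match)
def pyGetKD (r : List (String × String)) (k d : String) : String := PySem.Dict.getD (PySem.Dict.mk r) k d

-- r.get("type", "other")
def rtypeOf (r : List (String × String)) : String := pyGetKD r "type" "other"

-- r.get("slug") or r.get("name", "?")   (falsy = missing key or empty string)
def slugOf (r : List (String × String)) : String :=
  if pyGetKD r "slug" "" = "" then pyGetKD r "name" "?" else pyGetKD r "slug" ""

-- (r.get("canonical_description") or "")[:35]
def descOf (r : List (String × String)) : String :=
  PySem.Str.slice (pyGetKD r "canonical_description" "") none (some 35)

-- repo_label(r)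
def repoLabel (r : List (String × String)) : String :=
  if descOf r = "" then "\"" ++ slugOf r ++ "\""
  else "\"" ++ slugOf r ++ "\\n" ++ descOf r ++ "\""

-- the node line '    {slug}[{repo_label(r)}]'
def nodeLine (r : List (String × String)) : String :=
  "    " ++ PySem.Str.replace (slugOf r) "-" "_" ++ "[" ++ repoLabel r ++ "]"

-- group_by_type: dict built by setdefault-and-append (= modify with default [])
def groupByType (repos : List (List (String × String))) : PySem.Dict String (List (List (String × String))) :=
  repos.foldl (fun d r => d.modify (rtypeOf r) [] (· ++ [r])) PySem.Dict.empty

-- sorted(groups.items()): dict keys are distinct, so Python's tuple comparison reduces to the key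
def generate_topology_mermaid (repos : List (List (String × String))) : String :=
  let groups := groupByType repos
  let lines :=
    (PySem.List.sorted groups.items (fun p => p.1) false).foldl (fun lines p =>
      let rtype := p.1
      let group := p.2
      let safe_id := PySem.Str.replace (PySem.Str.replace rtype "-" "_") " " "_"
      let label := pyTitle (PySem.Str.replace rtype "-" " ")
      let lines := lines ++ ["  subgraph " ++ safe_id ++ "[\"" ++ label ++ " Repos\"]"]
      let lines := (PySem.List.slice group none (some 8)).foldl
        (fun lines r => lines ++ [nodeLine r]) lines
      let lines :=
        if group.length > 8 then
          lines ++ ["    more_" ++ safe_id ++ "[\"… " ++ PySem.Int.toStr ((group.length : Int) - 8) ++ " more\"]"]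
        else lines
      lines ++ ["  end"]) ["```mermaid", "graph TB"]
  PySem.Str.join "\n" (lines ++ ["```"])

-- ===== PORT B =====
-- block(t, group): the subgraph lines for one type
def blockB (t : String) (group : List (List (String × String))) : List String :=
  let safe_id := PySem.Str.replace (PySem.Str.replace t "-" "_") " " "_"
  let title := pyTitle (PySem.Str.replace t "-" " ")
  ["  subgraph " ++ safe_id ++ "[\"" ++ title ++ " Repos\"]"]
    ++ (PySem.List.slice group none (some 8)).map nodeLine
    ++ (if group.length > 8 then
          ["    more_" ++ safe_id ++ "[\"… " ++ PySem.Int.toStr ((group.length : Int) - 8) ++ " more\"]"]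
        else [])
    ++ ["  end"]

def generate_topology_mermaid_alt (repos : List (List (String × String))) : String :=
  let types := PySem.List.sorted (PySem.Set.ofList (repos.map rtypeOf)) (fun t => t) false
  let blocks := types.flatMap (fun t => blockB t (repos.filter (fun r => rtypeOf r == t)))
  PySem.Str.join "\n" (["```mermaid", "graph TB"] ++ blocks ++ ["```"])

-- ===== PRECONDITION & SPEC =====
def Spec_generate_topology_mermaid (repos : List (List (String × String))) (out : String) : Prop := out = generate_topology_mermaid_alt repos
instance (repos : List (List (String × String))) (out : String) : Decidable (Spec_generate_topology_mermaid repos out) := by unfold Spec_generate_topology_mermaid; infer_instance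

-- ===== CLAIM (what is proved, stated in full; the proofs are below) =====
def Claim_equal_generate_topology_mermaid : Prop := ∀ (repos : List (List (String × String))), Dom_generate_topology_mermaid repos → Spec_generate_topology_mermaid repos (generate_topology_mermaid repos)

-- ===== LEMMAS AND PROOFS =====

-- the group stored under key t is exactly the filter of repos by type t
theorem getD_groupByType (repos : List (List (String × String))) (t : String) :
    (groupByType repos).getD t [] = repos.filter (fun r => rtypeOf r == t) := by
  have h : groupByType repos
      = (repos.map (fun r => (rtypeOf r, r))).foldl (fun d p => d.modify p.1 [] (· ++ [p.2])) PySem.Dict.empty := by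
    simp [groupByType, List.foldl_map]
  rw [h, PySem.Dict.getD_foldl_modify_append]
  simp [List.filter_map, Function.comp_def]

-- the dict's keys are the distinct types in first-occurrence order
theorem keys_groupByType (repos : List (List (String × String))) :
    (groupByType repos).keys = PySem.Set.ofList (repos.map rtypeOf) := by
  rw [groupByType, PySem.Dict.keys_foldl_modify_key repos rtypeOf [] (fun _ r => (· ++ [r]))]
  exact PySem.Set.update_nil_left _

theorem nodup_keys_groupByType (repos : List (List (String × String))) :
    (groupByType repos).keys.Nodup := by
  rw [keys_groupByType]; exact PySem.Set.nodup_ofList _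

-- sorting the items by key = mapping the sorted distinct types to their filtered groups
theorem sorted_items_groupByType (repos : List (List (String × String))) :
    PySem.List.sorted (groupByType repos).items (fun p => p.1) false
      = (PySem.List.sorted (PySem.Set.ofList (repos.map rtypeOf)) (fun t => t) false).map
          (fun t => (t, repos.filter (fun r => rtypeOf r == t))) := by
  set types := PySem.Set.ofList (repos.map rtypeOf) with htypes
  set f : String → String × List (List (String × String)) :=
    fun t => (t, repos.filter (fun r => rtypeOf r == t)) with hf
  have hitems : (groupByType repos).items = types.map f := by
    rw [PySem.Dict.items_eq_map_keys _ (nodup_keys_groupByType repos) []]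
    rw [keys_groupByType]
    exact List.map_congr_left (fun t _ => by simp [hf, getD_groupByType])
  have hperm : ((PySem.List.sorted types (fun t => t) false).map f).Perm ((groupByType repos).items) := by
    rw [hitems]
    exact (PySem.List.sorted_perm types (fun t => t) false).map f
  have hs : (PySem.List.sorted types (fun t => t) false).Nodup :=
    (PySem.List.sorted_perm types (fun t => t) false).nodup_iff.mpr (PySem.Set.nodup_ofList _)
  have hlt : List.Pairwise (fun a b => (fun p : String × List (List (String × String)) => p.1) a < (fun p => p.1) b)
      ((PySem.List.sorted types (fun t => t) false).map f) := by
    rw [List.pairwise_map]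
    have hle := PySem.List.sorted_pairwise types (fun t => t)
    exact (hle.and hs).imp (fun h => lt_of_le_of_ne h.1 h.2)
  exact PySem.List.sorted_eq_of_perm_of_pairwise_lt _ _ _ hperm hlt

-- one outer-loop iteration of A appends exactly B's block for that item
theorem stepA_eq_block (lines : List String) (p : String × List (List (String × String))) :
    (let rtype := p.1
     let group := p.2
     let safe_id := PySem.Str.replace (PySem.Str.replace rtype "-" "_") " " "_"
     let label := pyTitle (PySem.Str.replace rtype "-" " ")
     let lines := lines ++ ["  subgraph " ++ safe_id ++ "[\"" ++ label ++ " Repos\"]"]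
     let lines := (PySem.List.slice group none (some 8)).foldl
       (fun lines r => lines ++ [nodeLine r]) lines
     let lines :=
       if group.length > 8 then
         lines ++ ["    more_" ++ safe_id ++ "[\"… " ++ PySem.Int.toStr ((group.length : Int) - 8) ++ " more\"]"]
       else lines
     lines ++ ["  end"]) = lines ++ blockB p.1 p.2 := by
  simp only [blockB, PySem.List.foldl_append_singleton_eq_map]
  split_ifs <;> simp

-- ===== VERDICT (by name: the statement is the Claim_ definition above) =====
theorem generate_topology_mermaid_spec : Claim_equal_generate_topology_mermaid := by
  intro repos _
  show generate_topology_mermaid repos = generate_topology_mermaid_alt repos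
  unfold generate_topology_mermaid generate_topology_mermaid_alt
  have hfun :
      (fun (lines : List String) (p : String × List (List (String × String))) =>
        let rtype := p.1
        let group := p.2
        let safe_id := PySem.Str.replace (PySem.Str.replace rtype "-" "_") " " "_"
        let label := pyTitle (PySem.Str.replace rtype "-" " ")
        let lines := lines ++ ["  subgraph " ++ safe_id ++ "[\"" ++ label ++ " Repos\"]"]
        let lines := (PySem.List.slice group none (some 8)).foldl
          (fun lines r => lines ++ [nodeLine r]) lines
        let lines :=
          if group.length > 8 then
            lines ++ ["    more_" ++ safe_id ++ "[\"… " ++ PySem.Int.toStr ((group.length : Int) - 8) ++ " more\"]"]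
          else lines
        lines ++ ["  end"])
      = fun lines p => lines ++ blockB p.1 p.2 := by
    funext lines p; exact stepA_eq_block lines p
  rw [hfun]
  simp only [PySem.List.foldl_append_eq_flatMap (g := fun p : String × List (List (String × String)) => blockB p.1 p.2),
    sorted_items_groupByType]
  simp [List.flatMap_def, Function.comp_def]
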